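-- pv_equiv track=rewrite | github.com/qqzii/TMS | lesson5/task14.py | f11
-- ===== SOURCE A (Python) =====
-- def f11(x, y):
--     mass = []
--     for i in x:
--         for j in y:
--             if i != j:
--                 continue
--             else:
--                 mass.append(j)
--     return mass
-- ===== SOURCE B (Python) =====
-- def f11(x, y):
--     cnt = {}
--     for j in y:
--         cnt[j] = cnt.get(j, 0) + 1
--     mass = []
--     for i in x:
--         mass += [i] * cnt.get(i, 0)
--     return mass
-- ===== Notes on version B (the rewrite author's own statement) =====
-- stated objective: alternative
-- what changed: Replaces the nested scan of y for every element of x with a counting dict built once over y, then appends count[i] copies of each i; the per-pair scan disappears, though the output itself can be Theta(n*m) long so the measured speed-up was below threshold.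
import Mathlib
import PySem

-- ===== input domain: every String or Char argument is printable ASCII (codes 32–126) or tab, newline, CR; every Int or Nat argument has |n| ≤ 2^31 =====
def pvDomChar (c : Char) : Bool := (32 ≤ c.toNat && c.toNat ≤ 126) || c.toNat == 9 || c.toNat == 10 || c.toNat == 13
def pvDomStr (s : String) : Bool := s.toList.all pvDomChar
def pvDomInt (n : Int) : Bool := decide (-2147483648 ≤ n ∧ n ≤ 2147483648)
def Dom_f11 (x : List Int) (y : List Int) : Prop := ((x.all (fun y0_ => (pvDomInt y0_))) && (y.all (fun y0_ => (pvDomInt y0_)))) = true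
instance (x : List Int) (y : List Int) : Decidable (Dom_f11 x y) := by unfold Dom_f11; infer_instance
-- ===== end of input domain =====

-- B replaces A's nested scan of y per element of x with a count dict built once over y (alternative algorithm; same return value).

-- ===== PORT A =====
def f11 (x : List Int) (y : List Int) : List Int :=
  x.foldl (fun mass i =>
    y.foldl (fun mass j => if i ≠ j then mass else mass ++ [j]) mass) []

-- ===== PORT B =====
def f11_alt (x : List Int) (y : List Int) : List Int :=
  let cnt : PySem.Dict Int Int :=
    y.foldl (fun d j => d.insert j (d.getD j 0 + 1)) PySem.Dict.empty
  x.foldl (fun mass i => mass ++ List.replicate (cnt.getD i 0).toNat i) []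

-- ===== PRECONDITION & SPEC =====
def Spec_f11 (x : List Int) (y : List Int) (out : List Int) : Prop := out = f11_alt x y
instance (x : List Int) (y : List Int) (out : List Int) : Decidable (Spec_f11 x y out) := by unfold Spec_f11; infer_instance

-- ===== CLAIM (what is proved, stated in full; the proofs are below) =====
def Claim_equal_f11 : Prop := ∀ (x : List Int) (y : List Int), Dom_f11 x y → Spec_f11 x y (f11 x y)

-- ===== LEMMAS AND PROOFS =====

-- A's inner loop over y appends exactly (y.count i) copies of i
theorem f11_inner (i : Int) (y : List Int) (acc : List Int) :
    y.foldl (fun mass j => if i ≠ j then mass else mass ++ [j]) acc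
      = acc ++ List.replicate (y.count i) i := by
  induction y generalizing acc with
  | nil => simp
  | cons j ys ih =>
    simp only [List.foldl_cons, List.count_cons, ih]
    by_cases h : i = j
    · subst h
      simp [List.replicate_succ]
    · simp [h, Ne.symm h]

theorem f11_cnt (y : List Int) (i : Int) :
    ((y.foldl (fun d j => d.insert j (d.getD j 0 + 1)) (PySem.Dict.empty : PySem.Dict Int Int)).getD i 0).toNat
      = y.count i := by
  rw [PySem.Dict.foldl_insert_getD_add_one_eq_counter, PySem.Dict.getD_counter]
  simp

-- ===== VERDICT (by name: the statement is the Claim_ definition above) =====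
theorem f11_eq (y : List Int) (x : List Int) : f11 x y = f11_alt x y := by
  unfold f11 f11_alt
  induction x using List.reverseRecOn with
  | nil => simp
  | append_singleton xs i ih =>
    simp only [List.foldl_append, List.foldl_cons, List.foldl_nil, f11_inner, f11_cnt] at ih ⊢

theorem f11_spec : Claim_equal_f11 := by
  intro x y _
  exact f11_eq y x
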